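-- pv_equiv track=rewrite | github.com/burd5/codewars_python | weird_words.py | next_letter
-- ===== SOURCE A (Python) =====
-- def next_letter(s):
--     alph_lower = 'abcdefghijklmnopqrstuvwxyz'
--     alph_upper = 'ABCDEFGHIJKLMNOPQRSTUVWXYZ'
--     converted_str = ''
--     for i,letter in enumerate(s):
--         if letter in alph_lower:
--             letter_index = alph_lower.index(letter)
--             if letter == alph_lower[-1]:
--                 converted_str += 'a'
--             else: converted_str += alph_lower[letter_index + 1]
--         elif letter in alph_upper:
--             letter_index = alph_upper.index(letter)
--             if letter == alph_upper[-1]: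
--                 converted_str += 'A'
--             else: converted_str += alph_upper[letter_index + 1]
--         else:
--             converted_str += letter
--     return converted_str
-- ===== SOURCE B (Python) =====
-- def next_letter(s):
--     lower = 'abcdefghijklmnopqrstuvwxyz'
--     upper = 'ABCDEFGHIJKLMNOPQRSTUVWXYZ'
--     table = str.maketrans(lower + upper, lower[1:] + lower[0] + upper[1:] + upper[0])
--     return s.translate(table)
-- ===== Notes on version B (the rewrite author's own statement) =====
-- stated objective: idiomatic
-- what changed: Replaces the per-character branch-and-index loop with a translation table built once (str.maketrans of the alphabets onto their left rotations) and a single str.translate call.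
import Mathlib
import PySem

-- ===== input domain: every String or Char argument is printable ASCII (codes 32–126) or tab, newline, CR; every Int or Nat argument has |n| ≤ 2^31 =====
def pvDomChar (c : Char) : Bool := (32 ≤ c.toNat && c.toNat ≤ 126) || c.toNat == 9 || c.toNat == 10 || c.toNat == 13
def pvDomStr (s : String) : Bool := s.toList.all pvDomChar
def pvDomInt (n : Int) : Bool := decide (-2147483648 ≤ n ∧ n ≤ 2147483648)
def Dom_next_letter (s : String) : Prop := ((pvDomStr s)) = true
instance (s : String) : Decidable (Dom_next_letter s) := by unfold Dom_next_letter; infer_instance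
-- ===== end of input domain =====

-- B replaces A's per-character branch-and-index loop by a translation table built once
-- from the rotated alphabets (Python str.maketrans/translate); objective: idiomatic.


-- ===== PORT A =====
def next_letter (s : String) : String :=
  let alph_lower := "abcdefghijklmnopqrstuvwxyz".toList
  let alph_upper := "ABCDEFGHIJKLMNOPQRSTUVWXYZ".toList
  let converted := s.toList.foldl (fun acc letter =>
    if letter ∈ alph_lower then
      let letter_index := (PySem.List.index? alph_lower letter).getD 0
      if some letter = PySem.List.pyGet? alph_lower (-1) then acc ++ ['a']
      else acc ++ [(PySem.List.pyGet? alph_lower (letter_index + 1)).getD letter]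
    else if letter ∈ alph_upper then
      let letter_index := (PySem.List.index? alph_upper letter).getD 0
      if some letter = PySem.List.pyGet? alph_upper (-1) then acc ++ ['A']
      else acc ++ [(PySem.List.pyGet? alph_upper (letter_index + 1)).getD letter]
    else acc ++ [letter]) []
  String.ofList converted

-- ===== PORT B =====
def next_letter_alt (s : String) : String :=
  let lower := "abcdefghijklmnopqrstuvwxyz".toList
  let upper := "ABCDEFGHIJKLMNOPQRSTUVWXYZ".toList
  let table := (lower ++ upper).zip ((lower.drop 1 ++ lower.take 1) ++ (upper.drop 1 ++ upper.take 1))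
  String.ofList (s.toList.map (fun c => ((table.find? (fun p => p.1 = c)).map Prod.snd).getD c))

-- ===== PRECONDITION & SPEC =====
def Spec_next_letter (s : String) (out : String) : Prop := out = next_letter_alt s
instance (s : String) (out : String) : Decidable (Spec_next_letter s out) := by unfold Spec_next_letter; infer_instance

-- ===== CLAIM (what is proved, stated in full; the proofs are below) =====
def Claim_equal_next_letter : Prop := ∀ (s : String), Dom_next_letter s → Spec_next_letter s (next_letter s)

-- ===== LEMMAS AND PROOFS =====

-- A's per-character step, factored out of its foldl body
def pvStepA (letter : Char) : Char :=
  let alph_lower := "abcdefghijklmnopqrstuvwxyz".toList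
  let alph_upper := "ABCDEFGHIJKLMNOPQRSTUVWXYZ".toList
  if letter ∈ alph_lower then
    let letter_index := (PySem.List.index? alph_lower letter).getD 0
    if some letter = PySem.List.pyGet? alph_lower (-1) then 'a'
    else (PySem.List.pyGet? alph_lower (letter_index + 1)).getD letter
  else if letter ∈ alph_upper then
    let letter_index := (PySem.List.index? alph_upper letter).getD 0
    if some letter = PySem.List.pyGet? alph_upper (-1) then 'A'
    else (PySem.List.pyGet? alph_upper (letter_index + 1)).getD letter
  else letter

-- B's per-character step
def pvStepB (c : Char) : Char :=
  let lower := "abcdefghijklmnopqrstuvwxyz".toList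
  let upper := "ABCDEFGHIJKLMNOPQRSTUVWXYZ".toList
  let table := (lower ++ upper).zip ((lower.drop 1 ++ lower.take 1) ++ (upper.drop 1 ++ upper.take 1))
  ((table.find? (fun p => p.1 = c)).map Prod.snd).getD c

theorem pvBodyA : (fun (acc : List Char) (letter : Char) =>
    if letter ∈ "abcdefghijklmnopqrstuvwxyz".toList then
      let letter_index := (PySem.List.index? "abcdefghijklmnopqrstuvwxyz".toList letter).getD 0
      if some letter = PySem.List.pyGet? "abcdefghijklmnopqrstuvwxyz".toList (-1) then acc ++ ['a']
      else acc ++ [(PySem.List.pyGet? "abcdefghijklmnopqrstuvwxyz".toList (letter_index + 1)).getD letter]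
    else if letter ∈ "ABCDEFGHIJKLMNOPQRSTUVWXYZ".toList then
      let letter_index := (PySem.List.index? "ABCDEFGHIJKLMNOPQRSTUVWXYZ".toList letter).getD 0
      if some letter = PySem.List.pyGet? "ABCDEFGHIJKLMNOPQRSTUVWXYZ".toList (-1) then acc ++ ['A']
      else acc ++ [(PySem.List.pyGet? "ABCDEFGHIJKLMNOPQRSTUVWXYZ".toList (letter_index + 1)).getD letter]
    else acc ++ [letter]) = fun acc letter => acc ++ [pvStepA letter] := by
  funext acc letter
  simp only [pvStepA]
  split_ifs <;> rfl

theorem pvFoldStep (l acc : List Char) :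
    l.foldl (fun a c => a ++ [pvStepA c]) acc = acc ++ l.map pvStepA := by
  induction l generalizing acc with
  | nil => simp
  | cons c t ih => simp [ih]

-- the two steps agree on every character with code < 128 (covers Dom); decided by enumeration
theorem pvStepAgree : ((List.range 128).all
    (fun n => pvStepA (Char.ofNat n) == pvStepB (Char.ofNat n))) = true := by decide

theorem pvStepEq (c : Char) (h : pvDomChar c = true) : pvStepA c = pvStepB c := by
  have hlt : c.toNat < 128 := by
    unfold pvDomChar at h
    simp only [Bool.or_eq_true, Bool.and_eq_true, decide_eq_true_eq, beq_iff_eq] at h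
    omega
  have := List.all_eq_true.mp pvStepAgree c.toNat (List.mem_range.mpr hlt)
  simpa [Char.ofNat_toNat, beq_iff_eq] using this

-- ===== VERDICT (by name: the statement is the Claim_ definition above) =====
theorem next_letter_spec : Claim_equal_next_letter := by
  intro s hdom
  unfold Spec_next_letter
  simp only [next_letter, next_letter_alt]
  rw [pvBodyA, pvFoldStep, List.nil_append]
  congr 1
  apply List.map_congr_left
  intro c hc
  exact pvStepEq c (List.all_eq_true.mp hdom c hc)
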